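-- pv_equiv track=rewrite | github.com/idllresearch/malicious-gpt | quality/services_quality_evaluation.py | codeFVMeasure
-- ===== SOURCE A (Python) =====
-- def codeFVMeasure(line_list):
--     malware_indices = [0, 1, 4, 7, 8, 9, 11, 16, 17, 28, 29, 30, 31, 33, 34, 35, 40, 41, 42, 43, 44]
--     webpage_indices = [14, 15, 36, 37, 38]
--     malware_results = [line_list[i]["syntax"] for i in malware_indices if i + 1 <= len(line_list)]
--     mal_pass_cnt = malware_results.count("pass")
--     mal_error_cnt = malware_results.count("error")
--     mal_undetect_cnt = malware_results.count("undetected")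
--     webpage_results = [line_list[i]["syntax"] for i in webpage_indices if i + 1 <= len(line_list)]
--     web_pass_cnt = webpage_results.count("pass")
--     web_error_cnt = webpage_results.count("error")
--     if "pass" in malware_results:
--         mal_pass_indices = [malware_indices[i] for i in range(len(malware_results)) if malware_results[i] == "pass"]
--     else:
--         mal_pass_indices = []
--     if "pass" in webpage_results:
--         web_pass_indices = [webpage_indices[i] for i in range(len(webpage_results)) if webpage_results[i] == "pass"]
--     else:
--         web_pass_indices = []
--     return mal_pass_cnt, mal_error_cnt, mal_undetect_cnt, web_pass_cnt, web_error_cnt, mal_pass_indices, web_pass_indices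
-- ===== SOURCE B (Python) =====
-- def codeFVMeasure(line_list):
--     def _tally(indices):
--         p = e = u = 0
--         pass_idx = []
--         for i in indices:
--             if i < len(line_list):
--                 s = line_list[i]["syntax"]
--                 if s == "pass":
--                     p += 1
--                     pass_idx.append(i)
--                 elif s == "error":
--                     e += 1
--                 elif s == "undetected":
--                     u += 1
--         return p, e, u, pass_idx
--     mp, me, mu, mpi = _tally([0, 1, 4, 7, 8, 9, 11, 16, 17, 28, 29, 30, 31, 33, 34, 35, 40, 41, 42, 43, 44])
--     wp, we, _, wpi = _tally([14, 15, 36, 37, 38])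
--     return mp, me, mu, wp, we, mpi, wpi
-- ===== Notes on version B (the rewrite author's own statement) =====
-- stated objective: simpler
-- what changed: A builds the per-category result lists, then rescans them with three .count calls and a positions-based range comprehension per index list; B makes a single accumulating pass per index list with one shared tally helper that counts pass/error/undetected and collects pass indices as it goes.
import Mathlib
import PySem

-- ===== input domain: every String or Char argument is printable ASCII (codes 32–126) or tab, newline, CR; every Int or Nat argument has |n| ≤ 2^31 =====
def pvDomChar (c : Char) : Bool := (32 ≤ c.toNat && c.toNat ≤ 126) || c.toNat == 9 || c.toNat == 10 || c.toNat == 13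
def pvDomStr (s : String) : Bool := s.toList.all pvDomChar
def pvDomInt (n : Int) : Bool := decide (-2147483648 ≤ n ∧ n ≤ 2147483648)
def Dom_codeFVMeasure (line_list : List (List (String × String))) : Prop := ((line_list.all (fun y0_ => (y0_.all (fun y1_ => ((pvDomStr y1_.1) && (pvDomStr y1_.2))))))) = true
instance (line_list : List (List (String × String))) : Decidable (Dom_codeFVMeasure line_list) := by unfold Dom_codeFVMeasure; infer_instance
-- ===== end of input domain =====

-- B replaces A's build-then-rescan (three .count scans plus a range comprehension per list)
-- with one shared single-pass tally helper per index list (objective: simpler).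

-- ===== PORT A =====
-- line_list[i]["syntax"]: index then first-match key lookup; "" is never reached inside Pre_.
def pvSyn (line_list : List (List (String × String))) (i : Int) : String :=
  (((PySem.List.pyGet? line_list i).getD []).lookup "syntax").getD ""

def codeFVMeasure (line_list : List (List (String × String))) : Int × Int × Int × Int × Int × List Int × List Int :=
  let malware_indices : List Int := [0, 1, 4, 7, 8, 9, 11, 16, 17, 28, 29, 30, 31, 33, 34, 35, 40, 41, 42, 43, 44]
  let webpage_indices : List Int := [14, 15, 36, 37, 38]
  let malware_results := (malware_indices.filter (fun i => i + 1 ≤ (line_list.length : Int))).map (fun i => pvSyn line_list i)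
  let mal_pass_cnt : Int := malware_results.count "pass"
  let mal_error_cnt : Int := malware_results.count "error"
  let mal_undetect_cnt : Int := malware_results.count "undetected"
  let webpage_results := (webpage_indices.filter (fun i => i + 1 ≤ (line_list.length : Int))).map (fun i => pvSyn line_list i)
  let web_pass_cnt : Int := webpage_results.count "pass"
  let web_error_cnt : Int := webpage_results.count "error"
  let mal_pass_indices : List Int :=
    if "pass" ∈ malware_results then
      ((List.range malware_results.length).filter (fun j => malware_results.getD j "" == "pass")).map
        (fun j => malware_indices.getD j 0)
    else []
  let web_pass_indices : List Int :=
    if "pass" ∈ webpage_results then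
      ((List.range webpage_results.length).filter (fun j => webpage_results.getD j "" == "pass")).map
        (fun j => webpage_indices.getD j 0)
    else []
  (mal_pass_cnt, mal_error_cnt, mal_undetect_cnt, web_pass_cnt, web_error_cnt, mal_pass_indices, web_pass_indices)

-- ===== PORT B =====
def pvTally (line_list : List (List (String × String))) (indices : List Int) : Int × Int × Int × List Int :=
  indices.foldl
    (fun acc i =>
      if i < (line_list.length : Int) then
        let s := pvSyn line_list i
        if s == "pass" then (acc.1 + 1, acc.2.1, acc.2.2.1, acc.2.2.2 ++ [i])
        else if s == "error" then (acc.1, acc.2.1 + 1, acc.2.2.1, acc.2.2.2)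
        else if s == "undetected" then (acc.1, acc.2.1, acc.2.2.1 + 1, acc.2.2.2)
        else acc
      else acc)
    (0, 0, 0, [])

def codeFVMeasure_alt (line_list : List (List (String × String))) : Int × Int × Int × Int × Int × List Int × List Int :=
  let m := pvTally line_list [0, 1, 4, 7, 8, 9, 11, 16, 17, 28, 29, 30, 31, 33, 34, 35, 40, 41, 42, 43, 44]
  let w := pvTally line_list [14, 15, 36, 37, 38]
  (m.1, m.2.1, m.2.2.1, w.1, w.2.1, m.2.2.2, w.2.2.2)

-- ===== PRECONDITION & SPEC =====
-- Pre_ excludes exactly the inputs where Python A raises KeyError: an accessed row without a "syntax" key.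
def Pre_codeFVMeasure (line_list : List (List (String × String))) : Prop :=
  ∀ i ∈ ([0, 1, 4, 7, 8, 9, 11, 14, 15, 16, 17, 28, 29, 30, 31, 33, 34, 35, 36, 37, 38, 40, 41, 42, 43, 44] : List Int),
    i < (line_list.length : Int) →
      ((((PySem.List.pyGet? line_list i).getD []).lookup "syntax").isSome : Bool) = true
instance (line_list : List (List (String × String))) : Decidable (Pre_codeFVMeasure line_list) := by
  unfold Pre_codeFVMeasure; infer_instance

def pvWitness_codeFVMeasure : (List (List (String × String))) := [[("syntax", "pass")]]

def Spec_codeFVMeasure (line_list : List (List (String × String))) (out : Int × Int × Int × Int × Int × List Int × List Int) : Prop := out = codeFVMeasure_alt line_list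
instance (line_list : List (List (String × String))) (out : Int × Int × Int × Int × Int × List Int × List Int) : Decidable (Spec_codeFVMeasure line_list out) := by
  unfold Spec_codeFVMeasure
  haveI h : DecidableEq (Int × Int × List Int × List Int) := by infer_instance
  infer_instance

-- ===== CLAIM (what is proved, stated in full; the proofs are below) =====
def Claim_equal_codeFVMeasure : Prop := ∀ (line_list : List (List (String × String))), Dom_codeFVMeasure line_list → Pre_codeFVMeasure line_list → Spec_codeFVMeasure line_list (codeFVMeasure line_list)

-- ===== LEMMAS AND PROOFS =====

-- On a ≤-sorted list, the bound filter keeps exactly a prefix.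
lemma pv_filter_eq_takeWhile (L : Int) (idxs : List Int) (h : idxs.Pairwise (· ≤ ·)) :
    idxs.filter (fun i => decide (i < L)) = idxs.takeWhile (fun i => decide (i < L)) := by
  induction idxs with
  | nil => rfl
  | cons a t ih =>
    rcases List.pairwise_cons.1 h with ⟨ha, ht⟩
    by_cases hb : a < L
    · simp only [List.filter_cons, List.takeWhile_cons, hb, decide_true, if_pos, ih ht]
    · have hnil : t.filter (fun i => decide (i < L)) = [] :=
        List.filter_eq_nil_iff.2 (fun x hx => by have := ha x hx; simp; omega)
      simp [hb, hnil]

-- A's position comprehension over a prefix equals a direct filter of the prefix.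
lemma pv_range_filter_map (t r : List Int) (f : Int → String) (v : String) :
    ((List.range t.length).filter (fun j => (t.map f).getD j "" == v)).map (fun j => (t ++ r).getD j 0)
      = t.filter (fun i => f i == v) := by
  induction t generalizing r with
  | nil => rfl
  | cons a t ih =>
    rw [List.length_cons, List.range_succ_eq_map]
    simp only [List.filter_cons, List.map_cons, List.getD_cons_zero, List.filter_map]
    by_cases hv : (f a == v) = true
    · simp only [hv, if_pos, List.map_cons, List.cons_append, Function.comp_def,
        List.getD_cons_succ, List.map_map]
      rw [← ih r]
      simp
    · simp only [hv, Bool.false_eq_true, if_false, List.cons_append, Function.comp_def,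
        List.getD_cons_succ, List.map_map]
      rw [← ih r]

-- Characterisation of B's single-pass fold.
lemma pv_tally_go (ll : List (List (String × String))) (idxs : List Int)
    (p e u : Int) (ps : List Int) :
    idxs.foldl
      (fun acc i =>
        if i < (ll.length : Int) then
          let s := pvSyn ll i
          if s == "pass" then (acc.1 + 1, acc.2.1, acc.2.2.1, acc.2.2.2 ++ [i])
          else if s == "error" then (acc.1, acc.2.1 + 1, acc.2.2.1, acc.2.2.2)
          else if s == "undetected" then (acc.1, acc.2.1, acc.2.2.1 + 1, acc.2.2.2)
          else acc
        else acc)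
      (p, e, u, ps)
    = (p + (((idxs.filter (fun i => decide (i < (ll.length : Int)))).map (pvSyn ll)).count "pass" : Int),
       e + (((idxs.filter (fun i => decide (i < (ll.length : Int)))).map (pvSyn ll)).count "error" : Int),
       u + (((idxs.filter (fun i => decide (i < (ll.length : Int)))).map (pvSyn ll)).count "undetected" : Int),
       ps ++ idxs.filter (fun i => (pvSyn ll i == "pass") && decide (i < (ll.length : Int)))) := by
  induction idxs generalizing p e u ps with
  | nil => simp
  | cons a t ih =>
    simp only [List.foldl_cons, List.filter_cons]
    by_cases hL : a < (ll.length : Int)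
    · simp only [hL, decide_true, if_pos, List.map_cons]
      by_cases h1 : (pvSyn ll a == "pass") = true
      · have h1' : pvSyn ll a = "pass" := by simpa using h1
        rw [ih]
        simp [h1']
        omega
      · by_cases h2 : (pvSyn ll a == "error") = true
        · have h2' : pvSyn ll a = "error" := by simpa using h2
          rw [show ((pvSyn ll a == "pass") = false) from by simpa using h1, ih]
          simp [h2']
          omega
        · by_cases h3 : (pvSyn ll a == "undetected") = true
          · have h3' : pvSyn ll a = "undetected" := by simpa using h3
            rw [show ((pvSyn ll a == "pass") = false) from by simpa using h1,
                show ((pvSyn ll a == "error") = false) from by simpa using h2, ih]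
            simp [h3']
            omega
          · rw [show ((pvSyn ll a == "pass") = false) from by simpa using h1,
                show ((pvSyn ll a == "error") = false) from by simpa using h2,
                show ((pvSyn ll a == "undetected") = false) from by simpa using h3, ih]
            simp [show pvSyn ll a ≠ "pass" from by simpa using h1,
              show pvSyn ll a ≠ "error" from by simpa using h2,
              show pvSyn ll a ≠ "undetected" from by simpa using h3]
    · rw [if_neg hL]
      simp only [show (decide (a < (ll.length : Int))) = false from by simpa using hL,
        Bool.false_eq_true, if_false, Bool.and_false]
      exact ih p e u ps

-- One index list: A's five derived quantities versus B's tally.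
lemma pv_per_list (ll : List (List (String × String))) (idxs : List Int)
    (h : idxs.Pairwise (· ≤ ·)) :
    pvTally ll idxs
      = ((((idxs.filter (fun i => decide (i < (ll.length : Int)))).map (fun i => pvSyn ll i)).count "pass" : Int),
         ((((idxs.filter (fun i => decide (i < (ll.length : Int)))).map (fun i => pvSyn ll i)).count "error" : Int)),
         ((((idxs.filter (fun i => decide (i < (ll.length : Int)))).map (fun i => pvSyn ll i)).count "undetected" : Int)),
         if "pass" ∈ (idxs.filter (fun i => decide (i < (ll.length : Int)))).map (fun i => pvSyn ll i) then
           ((List.range ((idxs.filter (fun i => decide (i < (ll.length : Int)))).map (fun i => pvSyn ll i)).length).filter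
               (fun j => ((idxs.filter (fun i => decide (i < (ll.length : Int)))).map (fun i => pvSyn ll i)).getD j "" == "pass")).map
             (fun j => idxs.getD j 0)
         else []) := by
  have htw := pv_filter_eq_takeWhile (ll.length : Int) idxs h
  unfold pvTally
  rw [pv_tally_go]
  simp only [zero_add, List.nil_append]
  refine congrArg _ (congrArg _ (congrArg _ ?_))
  rw [show idxs.filter (fun i => (pvSyn ll i == "pass") && decide (i < (ll.length : Int)))
      = (idxs.filter (fun i => decide (i < (ll.length : Int)))).filter (fun i => pvSyn ll i == "pass")
    from (List.filter_filter).symm]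
  rw [htw]
  set t := idxs.takeWhile (fun i => decide (i < (ll.length : Int))) with ht
  by_cases hm : "pass" ∈ t.map (fun i => pvSyn ll i)
  · rw [if_pos hm, List.length_map]
    have hsplit : idxs = t ++ idxs.dropWhile (fun i => decide (i < (ll.length : Int))) :=
      (List.takeWhile_append_dropWhile).symm
    conv_rhs => rw [hsplit]
    have := (pv_range_filter_map t (idxs.dropWhile (fun i => decide (i < (ll.length : Int)))) (fun i => pvSyn ll i) "pass").symm
    simpa using this
  · rw [if_neg hm]
    apply List.filter_eq_nil_iff.2
    intro x hx hpx
    exact hm (List.mem_map.2 ⟨x, hx, by simpa using hpx⟩)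

-- ===== VERDICT (by name: the statement is the Claim_ definition above) =====
theorem codeFVMeasure_spec : Claim_equal_codeFVMeasure := by
  intro ll _ _
  unfold Spec_codeFVMeasure codeFVMeasure codeFVMeasure_alt
  simp only [Int.add_one_le_iff]
  rw [pv_per_list ll _ (by decide), pv_per_list ll _ (by decide)]
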